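-- pv_equiv track=rewrite | github.com/huji-itmo/networks-homework | signal_plotter/metrics.py | find_max_consecutive
-- ===== SOURCE A (Python) =====
-- from typing import List, Optional
--
-- def find_max_consecutive(bits: List[int], value: int) -> int:
--     """Найти максимальную длину последовательности одинаковых бит"""
--     max_len = current = 0
--     for bit in bits:
--         if bit == value:
--             current += 1
--             max_len = max(max_len, current)
--         else:
--             current = 0
--     return max_len
-- ===== SOURCE B (Python) =====
-- from itertools import groupby
--
--
-- def find_max_consecutive(bits, value):
--     """Найти максимальную длину последовательности одинаковых бит"""
--     return max((sum(1 for _ in g) for k, g in groupby(bits) if k == value),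
--                default=0)
-- ===== Notes on version B (the rewrite author's own statement) =====
-- stated objective: idiomatic
-- what changed: Replaces the explicit running-counter-with-reset loop by itertools.groupby: split the list into maximal runs of equal elements, then take the max length over runs whose key equals value (default 0).
import Mathlib
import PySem

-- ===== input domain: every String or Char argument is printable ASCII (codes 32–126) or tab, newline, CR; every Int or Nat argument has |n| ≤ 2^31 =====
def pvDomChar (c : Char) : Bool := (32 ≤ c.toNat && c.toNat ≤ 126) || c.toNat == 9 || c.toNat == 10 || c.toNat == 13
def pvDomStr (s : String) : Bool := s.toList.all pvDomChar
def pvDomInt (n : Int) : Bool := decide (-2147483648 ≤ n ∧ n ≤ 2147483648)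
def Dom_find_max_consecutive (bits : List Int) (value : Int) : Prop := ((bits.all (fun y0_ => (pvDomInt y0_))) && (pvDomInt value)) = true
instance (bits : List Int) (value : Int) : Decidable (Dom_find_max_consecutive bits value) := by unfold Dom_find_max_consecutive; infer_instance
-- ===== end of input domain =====

-- B replaces A's running-counter-with-reset loop by a groupby-style decomposition:
-- split into maximal runs of equal elements, then max of lengths of the runs keyed by `value`.

-- ===== PORT A =====
-- literal port of A's loop: state (max_len, current), folded over bits
def find_max_consecutive (bits : List Int) (value : Int) : Int :=
  (bits.foldl
    (fun (s : Int × Int) bit =>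
      if bit = value then (max s.1 (s.2 + 1), s.2 + 1) else (s.1, 0))
    (0, 0)).1

-- ===== PORT B =====
-- itertools.groupby: maximal runs as (key, length) pairs, built left to right
def pvRunsGo (k : Int) (n : Int) : List Int → List (Int × Int)
  | [] => [(k, n)]
  | x :: xs => if x = k then pvRunsGo k (n + 1) xs else (k, n) :: pvRunsGo x 1 xs

def pvRuns : List Int → List (Int × Int)
  | [] => []
  | x :: xs => pvRunsGo x 1 xs

-- max(lengths of runs with key == value, default=0)
def find_max_consecutive_alt (bits : List Int) (value : Int) : Int :=
  ((pvRuns bits).filter (fun p => p.1 = value)).foldl (fun m p => max m p.2) 0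

-- ===== PRECONDITION & SPEC =====
def Spec_find_max_consecutive (bits : List Int) (value : Int) (out : Int) : Prop := out = find_max_consecutive_alt bits value
instance (bits : List Int) (value : Int) (out : Int) : Decidable (Spec_find_max_consecutive bits value out) := by unfold Spec_find_max_consecutive; infer_instance

-- ===== CLAIM (what is proved, stated in full; the proofs are below) =====
def Claim_equal_find_max_consecutive : Prop := ∀ (bits : List Int) (value : Int), Dom_find_max_consecutive bits value → Spec_find_max_consecutive bits value (find_max_consecutive bits value)

-- ===== LEMMAS AND PROOFS =====

-- abbreviations used only in the proofs
def pvStepA (v : Int) (s : Int × Int) (bit : Int) : Int × Int :=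
  if bit = v then (max s.1 (s.2 + 1), s.2 + 1) else (s.1, 0)

def pvMaxF (m : Int) (p : Int × Int) : Int := max m p.2

-- the head run of pvRunsGo v n xs has key v and length ≥ n, so the start of the
-- max-fold can absorb n
theorem pv_absorb (v : Int) :
    ∀ (xs : List Int) (n a : Int),
      ((pvRunsGo v n xs).filter (fun p => p.1 = v)).foldl pvMaxF a
        = ((pvRunsGo v n xs).filter (fun p => p.1 = v)).foldl pvMaxF (max a n) := by
  intro xs
  induction xs with
  | nil =>
    intro n a
    simp [pvRunsGo, pvMaxF]
  | cons x xs ih =>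
    intro n a
    by_cases hx : x = v
    · subst hx
      simp only [pvRunsGo, if_true]
      rw [ih (n + 1) a, ih (n + 1) (max a n)]
      have : max a (n + 1) = max (max a n) (n + 1) := by omega
      rw [this]
    · simp only [pvRunsGo, if_neg hx]
      simp [pvMaxF]

-- main invariant, both mid-run cases at once:
-- (i)  inside a run of `value` with count n ≤ m: A's fold from (m, n) equals B's
--      max-fold from m over pvRunsGo value n xs;
-- (ii) inside a run of a key k ≠ value (A's current = 0): same with pvRunsGo k n xs.
theorem pv_main (v : Int) :
    ∀ (xs : List Int),
      (∀ (n m : Int), n ≤ m →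
        (xs.foldl (pvStepA v) (m, n)).1
          = ((pvRunsGo v n xs).filter (fun p => p.1 = v)).foldl pvMaxF m) ∧
      (∀ (k n m : Int), k ≠ v →
        (xs.foldl (pvStepA v) (m, 0)).1
          = ((pvRunsGo k n xs).filter (fun p => p.1 = v)).foldl pvMaxF m) := by
  intro xs
  induction xs with
  | nil =>
    constructor
    · intro n m hnm
      simp [pvRunsGo, pvMaxF]
      omega
    · intro k n m hk
      simp [pvRunsGo, hk]
  | cons x xs ih =>
    obtain ⟨ihA, ihB⟩ := ih
    constructor
    · intro n m hnm
      by_cases hx : x = v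
      · subst hx
        simp only [List.foldl_cons, pvStepA, if_true, pvRunsGo]
        rw [ihA (n + 1) (max m (n + 1)) (by omega)]
        rw [pv_absorb x xs (n + 1) m]
      · simp only [List.foldl_cons, pvStepA, pvRunsGo, if_neg hx]
        rw [ihB x 1 m hx]
        simp only [List.filter_cons, decide_eq_true_eq, if_true]
        have : pvMaxF m (v, n) = m := by simp [pvMaxF]; omega
        rw [List.foldl_cons, this]
    · intro k n m hk
      by_cases hx : x = k
      · subst hx
        simp only [List.foldl_cons, pvStepA, if_neg hk, pvRunsGo, if_true]
        exact ihB x (n + 1) m hk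
      · by_cases hv : x = v
        · subst hv
          simp only [List.foldl_cons, pvStepA, if_true, pvRunsGo, if_neg hx]
          rw [show (max m ((0:Int) + 1), (0:Int) + 1) = (max m 1, 1) by norm_num]
          rw [ihA 1 (max m 1) (by omega)]
          simp only [List.filter_cons, decide_eq_true_eq]
          rw [if_neg hk, pv_absorb x xs 1 m]
        · simp only [List.foldl_cons, pvStepA, if_neg hv, pvRunsGo, if_neg hx]
          rw [ihB x 1 m hv]
          simp only [List.filter_cons, decide_eq_true_eq, if_neg hk]

-- ===== VERDICT (by name: the statement is the Claim_ definition above) =====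
theorem find_max_consecutive_spec : Claim_equal_find_max_consecutive := by
  intro bits value _
  show find_max_consecutive bits value = find_max_consecutive_alt bits value
  unfold find_max_consecutive find_max_consecutive_alt
  rw [show (fun (s : Int × Int) bit =>
        if bit = value then (max s.1 (s.2 + 1), s.2 + 1) else (s.1, 0)) = pvStepA value from rfl,
      show (fun (m : Int) (p : Int × Int) => max m p.2) = pvMaxF from rfl]
  cases bits with
  | nil => rfl
  | cons x xs =>
    simp only [pvRuns, List.foldl_cons]
    by_cases hx : x = value
    · subst hx
      rw [show pvStepA x (0, 0) x = (1, 1) by simp [pvStepA]]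
      rw [(pv_main x xs).1 1 1 le_rfl, pv_absorb x xs 1 0]
      norm_num
    · rw [show pvStepA value (0, 0) x = (0, 0) by simp [pvStepA, hx]]
      exact (pv_main value xs).2 x 1 0 hx
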